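-- pv_equiv track=rewrite | github.com/OpenBMB/BMInf | bminf/arch/scheduler.py | calc_fixed_layers
-- ===== SOURCE A (Python) =====
-- def calc_fixed_layers(total_layers, max_fixed):
--     max_fixed = min(max_fixed, total_layers)
--     scheduled_layers = total_layers - max_fixed
--     vals = [(i + 1) * scheduled_layers // total_layers for i in range(total_layers)]
--     ret = []
--     last_v = 0
--     for i, v in enumerate(vals):
--         if v == last_v:
--             ret.append(i)
--         else:
--             last_v = v
--     return ret
-- ===== SOURCE B (Python) =====
-- def calc_fixed_layers(total_layers, max_fixed):
--     # Invert the scheduling map: for each scheduled slot v, the floor-division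
--     # quotient first reaches v at index ceil(v*total_layers/s) - 1; those are
--     # exactly the dropped indices, the rest are kept.
--     s = total_layers - min(max_fixed, total_layers)
--     if s >= total_layers:
--         # the quotient advances at every index (or the range is empty): nothing is kept
--         return []
--     dropped = {-(-v * total_layers // s) - 1 for v in range(1, s + 1)}
--     return [i for i in range(total_layers) if i not in dropped]
-- ===== Notes on version B (the rewrite author's own statement) =====
-- stated objective: alternative
-- what changed: Instead of scanning the quotient sequence with a running last_v to detect transitions, B inverts the scheduling map: for each scheduled slot v in 1..s it computes the unique index ceil(v*n/s)-1 where the floor-division quotient first reaches v, collects these into a dropped set, and returns the remaining indices.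
import Mathlib
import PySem

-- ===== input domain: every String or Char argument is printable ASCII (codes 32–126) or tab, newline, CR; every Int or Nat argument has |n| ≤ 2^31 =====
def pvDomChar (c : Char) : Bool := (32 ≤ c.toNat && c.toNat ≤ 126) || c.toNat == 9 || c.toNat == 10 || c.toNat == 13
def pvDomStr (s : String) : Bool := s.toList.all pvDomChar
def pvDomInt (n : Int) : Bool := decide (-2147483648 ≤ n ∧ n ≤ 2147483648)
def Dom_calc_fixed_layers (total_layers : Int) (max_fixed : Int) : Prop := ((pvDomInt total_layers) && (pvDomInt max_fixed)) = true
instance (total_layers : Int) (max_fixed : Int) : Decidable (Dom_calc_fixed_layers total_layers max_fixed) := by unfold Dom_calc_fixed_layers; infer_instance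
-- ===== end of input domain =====

-- B inverts the scheduling map: instead of scanning the quotient sequence with a running
-- last_v, it computes for each slot v the index where the quotient first reaches v
-- (ceiling division), collects those into a dropped set, and keeps the rest (alternative).

-- ===== PORT A =====
-- The 'for i, v in enumerate(vals)' loop is a fold over vals whose state carries the
-- running index i alongside (ret, last_v); this is exact for enumerate starting at 0.
def calc_fixed_layers (total_layers : Int) (max_fixed : Int) : List Int :=
  let max_fixed' := min max_fixed total_layers
  let scheduled_layers := total_layers - max_fixed'
  let vals := (PySem.List.pyRange 0 total_layers 1).map
    (fun i => PySem.Int.floordiv ((i + 1) * scheduled_layers) total_layers)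
  let st := vals.foldl
    (fun (st : List Int × Int × Int) (v : Int) =>
      if v = st.2.1 then (st.1 ++ [st.2.2], st.2.1, st.2.2 + 1)
      else (st.1, v, st.2.2 + 1))
    ([], 0, 0)
  st.1

-- ===== PORT B =====
def calc_fixed_layers_alt (total_layers : Int) (max_fixed : Int) : List Int :=
  let s := total_layers - min max_fixed total_layers
  if total_layers ≤ s then []
  else
    let dropped : PySem.Set Int := PySem.Set.ofList
      ((PySem.List.pyRange 1 (s + 1) 1).map
        (fun v => -(PySem.Int.floordiv (-v * total_layers) s) - 1))
    (PySem.List.pyRange 0 total_layers 1).filter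
      (fun i => !(PySem.Set.contains dropped i))

-- ===== PRECONDITION & SPEC =====
def Spec_calc_fixed_layers (total_layers : Int) (max_fixed : Int) (out : List Int) : Prop := out = calc_fixed_layers_alt total_layers max_fixed
instance (total_layers : Int) (max_fixed : Int) (out : List Int) : Decidable (Spec_calc_fixed_layers total_layers max_fixed out) := by unfold Spec_calc_fixed_layers; infer_instance

-- ===== CLAIM (what is proved, stated in full; the proofs are below) =====
def Claim_equal_calc_fixed_layers : Prop := ∀ (total_layers : Int) (max_fixed : Int), Dom_calc_fixed_layers total_layers max_fixed → Spec_calc_fixed_layers total_layers max_fixed (calc_fixed_layers total_layers max_fixed)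

-- ===== LEMMAS AND PROOFS =====

-- A's loop invariant: entering index a, last_v = (a*s)//T and the index counter = a; in
-- both branches last_v leaves the step equal to ((a+1)*s)//T, so the stateful scan equals
-- the stateless transition filter.
theorem foldA (s T : Int) : ∀ (a : Int) (acc : List Int),
    ((PySem.List.pyRange a T 1).foldl
      (fun (st : List Int × Int × Int) (j : Int) =>
        if PySem.Int.floordiv ((j + 1) * s) T = st.2.1 then (st.1 ++ [st.2.2], st.2.1, st.2.2 + 1)
        else (st.1, PySem.Int.floordiv ((j + 1) * s) T, st.2.2 + 1))
      (acc, PySem.Int.floordiv (a * s) T, a)).1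
    = acc ++ (PySem.List.pyRange a T 1).filter
        (fun j => PySem.Int.floordiv ((j + 1) * s) T == PySem.Int.floordiv (j * s) T) := by
  intro a acc
  by_cases h : T ≤ a
  · rw [PySem.List.pyRange_one_eq_nil h]; simp
  · rw [PySem.List.pyRange_one_cons (by omega)]
    simp only [List.foldl_cons, List.filter_cons]
    by_cases hc : PySem.Int.floordiv ((a + 1) * s) T = PySem.Int.floordiv (a * s) T
    · rw [if_pos hc]
      have := foldA s T (a + 1) (acc ++ [a])
      rw [hc] at this
      rw [this]
      simp [hc]
    · rw [if_neg hc]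
      rw [foldA s T (a + 1) acc]
      simp [hc]
termination_by a _ => (T - a).toNat
decreasing_by all_goals omega

-- Inversion: for 0 < s and 0 ≤ i < n, index i is a dropped index (i.e. of the form
-- ceil(v*n/s) - 1 for some 1 ≤ v ≤ s) iff the quotient advances at i.
theorem drop_iff (n s i : Int) (hn : 0 < n) (hs : 0 < s) (hi0 : 0 ≤ i) (hin : i < n) :
    (∃ v, 1 ≤ v ∧ v ≤ s ∧ -(PySem.Int.floordiv (-v * n) s) - 1 = i) ↔
    PySem.Int.floordiv ((i + 1) * s) n ≠ PySem.Int.floordiv (i * s) n := by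
  constructor
  · rintro ⟨v, hv1, hvs, hvi⟩
    have hc : -(PySem.Int.floordiv (-(v * n)) s) = i + 1 := by
      rw [show -v * n = -(v * n) by ring] at hvi; omega
    rw [PySem.Int.neg_floordiv_neg_eq_iff_of_pos hs] at hc
    obtain ⟨h1, h2⟩ := hc
    have hlt : PySem.Int.floordiv (i * s) n < v := by
      rw [PySem.Int.floordiv_lt_iff_lt_mul hn]
      calc i * s = (i + 1 - 1) * s := by ring
        _ < v * n := h1
    have hle : v ≤ PySem.Int.floordiv ((i + 1) * s) n := by
      rw [PySem.Int.le_floordiv_iff_mul_le hn]; exact h2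
    omega
  · intro hne
    have hq00 : 0 ≤ PySem.Int.floordiv (i * s) n := by
      rw [PySem.Int.le_floordiv_iff_mul_le hn]
      simpa using mul_nonneg hi0 (le_of_lt hs)
    have hq0s : PySem.Int.floordiv (i * s) n < s := by
      rw [PySem.Int.floordiv_lt_iff_lt_mul hn]
      calc i * s < n * s := mul_lt_mul_of_pos_right hin hs
        _ = s * n := by ring
    have hmono : PySem.Int.floordiv (i * s) n ≤ PySem.Int.floordiv ((i + 1) * s) n := by
      rw [PySem.Int.le_floordiv_iff_mul_le hn]
      have h1 : PySem.Int.floordiv (i * s) n * n ≤ i * s :=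
        (PySem.Int.le_floordiv_iff_mul_le hn).mp (le_refl _)
      nlinarith
    set v := PySem.Int.floordiv (i * s) n + 1 with hv
    have h1 : i * s < v * n :=
      (PySem.Int.floordiv_lt_iff_lt_mul hn).mp (by omega)
    have h2 : v * n ≤ (i + 1) * s :=
      (PySem.Int.le_floordiv_iff_mul_le hn).mp (by omega)
    refine ⟨v, by omega, by omega, ?_⟩
    have hc : -(PySem.Int.floordiv (-(v * n)) s) = i + 1 := by
      rw [PySem.Int.neg_floordiv_neg_eq_iff_of_pos hs]
      exact ⟨by calc (i + 1 - 1) * s = i * s := by ring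
                 _ < v * n := h1, h2⟩
    rw [show -v * n = -(v * n) by ring]
    omega

theorem calc_fixed_layers_eq (n m : Int) :
    calc_fixed_layers n m = calc_fixed_layers_alt n m := by
  simp only [calc_fixed_layers, calc_fixed_layers_alt]
  set s := n - min m n with hs
  have hs0 : 0 ≤ s := by have : min m n ≤ n := min_le_right m n; omega
  rw [List.foldl_map]
  have h0 : (0 : Int) = PySem.Int.floordiv (0 * s) n := by
    simp [PySem.Int.floordiv]
  have hA := foldA s n 0 []
  rw [← h0] at hA
  rw [hA, List.nil_append]
  by_cases hns : n ≤ s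
  · rw [if_pos hns]
    apply List.filter_eq_nil_iff.mpr
    intro j hj
    rw [PySem.List.mem_pyRange_one] at hj
    have hn : 0 < n := by omega
    have hq0 : PySem.Int.floordiv (j * s) n * n ≤ j * s :=
      (PySem.Int.le_floordiv_iff_mul_le hn).mp (le_refl _)
    have hstep : PySem.Int.floordiv (j * s) n + 1 ≤ PySem.Int.floordiv ((j + 1) * s) n := by
      rw [PySem.Int.le_floordiv_iff_mul_le hn]
      nlinarith
    have hne : PySem.Int.floordiv ((j + 1) * s) n ≠ PySem.Int.floordiv (j * s) n := by omega
    simp [hne]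
  · rw [if_neg hns]
    apply List.filter_congr
    intro i hi
    rw [PySem.List.mem_pyRange_one] at hi
    have hn : 0 < n := by omega
    set S : PySem.Set Int := PySem.Set.ofList
        ((PySem.List.pyRange 1 (s + 1) 1).map
          (fun v => -(PySem.Int.floordiv (-v * n) s) - 1)) with hS
    have hcont : (PySem.Set.contains S i = true) ↔
        (∃ v, 1 ≤ v ∧ v ≤ s ∧ -(PySem.Int.floordiv (-v * n) s) - 1 = i) := by
      simp only [hS, PySem.Set.contains, List.contains_iff_mem, PySem.Set.mem_ofList,
        List.mem_map, PySem.List.mem_pyRange_one]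
      constructor
      · rintro ⟨v, ⟨h1, h2⟩, h3⟩; exact ⟨v, h1, by omega, h3⟩
      · rintro ⟨v, h1, h2, h3⟩; exact ⟨v, ⟨h1, by omega⟩, h3⟩
    rcases eq_or_lt_of_le hs0 with h0s | hpos
    · have hz : PySem.Int.floordiv ((i + 1) * s) n = PySem.Int.floordiv (i * s) n := by
        rw [← h0s]; simp
      have hb : PySem.Set.contains S i = false := by
        rw [hS, ← h0s]
        rfl
      rw [hb, hz]
      simp
    · have key := drop_iff n s i hn hpos hi.1 hi.2
      rcases Bool.eq_false_or_eq_true (PySem.Set.contains S i) with hb | hb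
      · have hne := key.mp (hcont.mp hb)
        rw [hb]
        simp [hne]
      · have heq : PySem.Int.floordiv ((i + 1) * s) n = PySem.Int.floordiv (i * s) n := by
          by_contra h
          have htrue := hcont.mpr (key.mpr h)
          simp only [PySem.Set.contains, List.contains_iff_mem] at htrue
          simp [htrue] at hb
        rw [hb, heq]
        simp

-- ===== VERDICT (by name: the statement is the Claim_ definition above) =====
theorem calc_fixed_layers_spec : Claim_equal_calc_fixed_layers := by
  intro total_layers max_fixed _
  exact calc_fixed_layers_eq total_layers max_fixed
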